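-- pv_equiv track=rewrite | github.com/dmx138/CS108---Intro-Python-Projects | final_exam.py | double_upper_case
-- ===== SOURCE A (Python) =====
-- def double_upper_case(s):
--     '''procs a string and doubles all uppper case letters, then lowercases the whole word'''
--
--     # set up an accumulator for a string
--     new_string = ''
--
--     # start by iterating over each letter in the string
--     for ch in s:
--
--         # check if ch is a letter first
--         if 97 <= ord(ch) <= 122 or 65 <= ord(ch) <= 90:
--
--             # check if the ch is uppercased or not
--             if ch == ch.upper():
--
--                 new_string += ch * 2
--
--             # if it's lowercased
--             elif ch == ch.lower():
--
--                 new_string += ch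
--
--         # print non-letters as normal
--         else:
--
--             new_string += ch
--
--
--     # return lowercased accumulator
--     return new_string.lower()
-- ===== SOURCE B (Python) =====
-- def double_upper_case(s):
--     '''procs a string and doubles all uppper case letters, then lowercases the whole word'''
--     table = str.maketrans({chr(c): chr(c + 32) * 2 for c in range(65, 91)})
--     return s.translate(table).lower()
-- ===== Notes on version B (the rewrite author's own statement) =====
-- stated objective: idiomatic
-- what changed: Replaced the explicit per-character accumulator loop with nested if/elif branches by a str.maketrans translation table mapping each ASCII uppercase letter to its doubled lowercase form, applied via s.translate(table).lower().
import Mathlib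
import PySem

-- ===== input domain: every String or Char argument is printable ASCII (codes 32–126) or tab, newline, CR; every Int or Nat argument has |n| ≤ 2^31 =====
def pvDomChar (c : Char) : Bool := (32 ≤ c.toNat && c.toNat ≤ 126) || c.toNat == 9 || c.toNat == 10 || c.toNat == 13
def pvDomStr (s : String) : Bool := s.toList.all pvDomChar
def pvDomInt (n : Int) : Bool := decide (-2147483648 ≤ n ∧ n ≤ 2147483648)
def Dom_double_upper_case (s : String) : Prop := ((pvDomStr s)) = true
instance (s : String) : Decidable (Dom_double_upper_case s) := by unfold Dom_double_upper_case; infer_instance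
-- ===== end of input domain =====

-- B replaces A's per-character if/elif accumulator loop by a translation table
-- (uppercase ↦ doubled lowercase) applied in one pass, then a final lowercase.

-- ===== PORT A =====
-- literal port of A's loop: accumulate per character with the same branch order, lowercase at the end
def double_upper_case (s : String) : String :=
  let new_string : List Char := s.toList.foldl (fun acc c =>
    if (97 ≤ c.toNat ∧ c.toNat ≤ 122) ∨ (65 ≤ c.toNat ∧ c.toNat ≤ 90) then
      if [c] = PySem.Chars.upper [c] then acc ++ [c, c]
      else if [c] = PySem.Chars.lower [c] then acc ++ [c]
      else acc
    else acc ++ [c]) []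
  String.ofList (PySem.Chars.lower new_string)

-- ===== PORT B =====
-- port of Source B: s.translate(table) with table = {chr(c): chr(c+32)*2 for c in range(65,91)},
-- i.e. each char in 65..90 is replaced by its doubled code-point+32 form, others pass through; then .lower()
def double_upper_case_alt (s : String) : String :=
  let translated : List Char := s.toList.flatMap (fun c =>
    if 65 ≤ c.toNat ∧ c.toNat ≤ 90 then
      [Char.ofNat (c.toNat + 32), Char.ofNat (c.toNat + 32)]
    else [c])
  String.ofList (PySem.Chars.lower translated)

-- ===== PRECONDITION & SPEC =====
def Spec_double_upper_case (s : String) (out : String) : Prop := out = double_upper_case_alt s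
instance (s : String) (out : String) : Decidable (Spec_double_upper_case s out) := by unfold Spec_double_upper_case; infer_instance

-- ===== CLAIM (what is proved, stated in full; the proofs are below) =====
def Claim_equal_double_upper_case : Prop := ∀ (s : String), Dom_double_upper_case s → Spec_double_upper_case s (double_upper_case s)

-- ===== LEMMAS AND PROOFS =====

theorem pvToNat_ofNat_small (n : Nat) (h : n < 200) : (Char.ofNat n).toNat = n := by
  rw [Char.toNat_ofNat, if_pos (Or.inl (by omega : n < 0xd800))]

theorem pvLe_char_iff (a c : Char) : (a ≤ c) ↔ a.toNat ≤ c.toNat := Iff.rfl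

-- A's loop body per character, as a list (the third branch is unreachable on letters)
def pvGA (c : Char) : List Char :=
  if (97 ≤ c.toNat ∧ c.toNat ≤ 122) ∨ (65 ≤ c.toNat ∧ c.toNat ≤ 90) then
    if [c] = PySem.Chars.upper [c] then [c, c]
    else if [c] = PySem.Chars.lower [c] then [c]
    else []
  else [c]

-- B's translation table per character
def pvGB (c : Char) : List Char :=
  if 65 ≤ c.toNat ∧ c.toNat ≤ 90 then
    [Char.ofNat (c.toNat + 32), Char.ofNat (c.toNat + 32)]
  else [c]

theorem pvChar_key (c : Char) : PySem.Chars.lower (pvGA c) = PySem.Chars.lower (pvGB c) := by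
  have h65 : ('A').toNat = 65 := rfl
  have h90 : ('Z').toNat = 90 := rfl
  have h97 : ('a').toNat = 97 := rfl
  have h122 : ('z').toNat = 122 := rfl
  unfold pvGA pvGB
  by_cases hu : 65 ≤ c.toNat ∧ c.toNat ≤ 90
  · have ht : (Char.ofNat (c.toNat + 32)).toNat = c.toNat + 32 := pvToNat_ofNat_small _ (by omega)
    have e1 : PySem.Chars.lowerChar c = Char.ofNat (c.toNat + 32) := by
      simp [PySem.Chars.lowerChar, PySem.Chars.isupper, pvLe_char_iff, h65, h90, hu.1, hu.2]
    have e2 : PySem.Chars.lowerChar (Char.ofNat (c.toNat + 32)) = Char.ofNat (c.toNat + 32) := by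
      simp only [PySem.Chars.lowerChar, PySem.Chars.isupper, pvLe_char_iff, h65, h90, ht]
      rw [if_neg (by simp; omega)]
    have hup : [c] = PySem.Chars.upper [c] := by
      simp [PySem.Chars.upper, PySem.Chars.upperChar, PySem.Chars.islower, pvLe_char_iff, h97, h122]
      omega
    rw [if_pos (Or.inr hu), if_pos hup, if_pos hu]
    simp [PySem.Chars.lower, e1, e2]
  · by_cases hl : 97 ≤ c.toNat ∧ c.toNat ≤ 122
    · have ht : (Char.ofNat (c.toNat - 32)).toNat = c.toNat - 32 := pvToNat_ofNat_small _ (by omega)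
      have hnup : ¬ ([c] = PySem.Chars.upper [c]) := by
        simp only [PySem.Chars.upper, PySem.Chars.upperChar, PySem.Chars.islower, pvLe_char_iff,
          h97, h122, List.map]
        rw [if_pos (by simp [hl.1, hl.2])]
        intro h
        have hc := congrArg Char.toNat (List.cons.inj h).1
        rw [ht] at hc
        omega
      have hlo : [c] = PySem.Chars.lower [c] := by
        simp [PySem.Chars.lower, PySem.Chars.lowerChar, PySem.Chars.isupper, pvLe_char_iff, h65, h90]
        omega
      rw [if_pos (Or.inl hl), if_neg hnup, if_pos hlo, if_neg hu]
    · rw [if_neg (by tauto), if_neg hu]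

theorem pvFoldl_eq_flatMap (l : List Char) :
    l.foldl (fun acc c =>
      if (97 ≤ c.toNat ∧ c.toNat ≤ 122) ∨ (65 ≤ c.toNat ∧ c.toNat ≤ 90) then
        if [c] = PySem.Chars.upper [c] then acc ++ [c, c]
        else if [c] = PySem.Chars.lower [c] then acc ++ [c]
        else acc
      else acc ++ [c]) [] = l.flatMap pvGA := by
  have h : ∀ (acc : List Char) (c : Char),
      (if (97 ≤ c.toNat ∧ c.toNat ≤ 122) ∨ (65 ≤ c.toNat ∧ c.toNat ≤ 90) then
        if [c] = PySem.Chars.upper [c] then acc ++ [c, c]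
        else if [c] = PySem.Chars.lower [c] then acc ++ [c]
        else acc
      else acc ++ [c]) = acc ++ pvGA c := by
    intro acc c
    unfold pvGA
    split_ifs <;> simp
  calc l.foldl (fun acc c =>
      if (97 ≤ c.toNat ∧ c.toNat ≤ 122) ∨ (65 ≤ c.toNat ∧ c.toNat ≤ 90) then
        if [c] = PySem.Chars.upper [c] then acc ++ [c, c]
        else if [c] = PySem.Chars.lower [c] then acc ++ [c]
        else acc
      else acc ++ [c]) []
      = l.foldl (fun acc c => acc ++ pvGA c) [] := by
        congr 1; funext acc c; exact h acc c
    _ = [] ++ l.flatMap pvGA := PySem.List.foldl_append_eq_flatMap pvGA l []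
    _ = l.flatMap pvGA := by simp

theorem pvLower_flatMap (l : List Char) :
    PySem.Chars.lower (l.flatMap pvGA) = PySem.Chars.lower (l.flatMap pvGB) := by
  induction l with
  | nil => rfl
  | cons c cs ih =>
    simp only [List.flatMap_cons, PySem.Chars.lower, List.map_append] at *
    rw [show List.map PySem.Chars.lowerChar (pvGA c) = PySem.Chars.lower (pvGA c) from rfl,
        show List.map PySem.Chars.lowerChar (pvGB c) = PySem.Chars.lower (pvGB c) from rfl,
        pvChar_key c, ih]

-- ===== VERDICT (by name: the statement is the Claim_ definition above) =====
theorem double_upper_case_spec : Claim_equal_double_upper_case := by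
  intro s _
  unfold Spec_double_upper_case double_upper_case double_upper_case_alt
  simp only []
  rw [pvFoldl_eq_flatMap]
  rw [show (s.toList.flatMap (fun c =>
    if 65 ≤ c.toNat ∧ c.toNat ≤ 90 then
      [Char.ofNat (c.toNat + 32), Char.ofNat (c.toNat + 32)]
    else [c])) = s.toList.flatMap pvGB from rfl]
  rw [pvLower_flatMap]
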